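-- pv_equiv track=rewrite | github.com/szarki9/BachelorMathematics-projects | CombinatoricalNumberTheory.py | find_blank_series
-- ===== SOURCE A (Python) =====
-- def find_blank_series(series, current_series):
--     blank_series = []
--     norm_col = "black"
--     for k in range(len(series)):
--         index = [(i, el.index(series[k])) for i, el in enumerate(current_series) if series[k] in el]
--         index = index[0][0]
--         if current_series[index][1] == norm_col:
--             blank_series.append(series[k])
--     return blank_series
-- ===== SOURCE B (Python) =====
-- def find_blank_series(series, current_series):
--     # One sweep over the rows: a row's color is read once (rows without a color
--     # cell are skipped), and each element gets the boolean of the first colored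
--     # row it appears in; the queries are then pure dict lookups.
--     is_black = {}
--     for row in current_series:
--         if len(row) > 1:
--             b = (row[1] == "black")
--             for el in row:
--                 is_black.setdefault(el, b)
--     return [s for s in series if is_black[s]]
-- ===== Notes on version B (the rewrite author's own statement) =====
-- stated objective: faster
-- what changed: A rescans all rows per series element (enumerate/membership/index comprehension) and then inspects the found row; B makes one sweep over the rows, reading each row's color cell once and recording a black/white boolean per first-seen element, so each query is a plain boolean dict lookup.
import Mathlib
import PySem

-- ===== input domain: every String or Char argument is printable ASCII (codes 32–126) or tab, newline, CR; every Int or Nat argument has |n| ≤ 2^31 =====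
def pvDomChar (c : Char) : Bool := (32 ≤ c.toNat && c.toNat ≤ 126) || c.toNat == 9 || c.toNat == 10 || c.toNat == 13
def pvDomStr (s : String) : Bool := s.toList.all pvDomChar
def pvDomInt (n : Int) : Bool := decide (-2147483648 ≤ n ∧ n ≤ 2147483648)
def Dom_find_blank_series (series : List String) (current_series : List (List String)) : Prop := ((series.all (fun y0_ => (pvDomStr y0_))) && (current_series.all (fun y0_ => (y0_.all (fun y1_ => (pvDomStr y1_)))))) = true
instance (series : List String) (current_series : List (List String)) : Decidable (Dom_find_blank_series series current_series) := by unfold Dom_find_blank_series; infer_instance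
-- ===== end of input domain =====

-- B replaces A's per-element rescan of all rows by one sweep recording a black/white boolean per first-seen element; measured faster in a timing run.


-- ===== PORT A =====
-- A's loop body for one element s: the comprehension over enumerate(current_series),
-- then index = index[0][0] and current_series[index][1] == "black".
-- none = the Python raises there (index[0] IndexError / row[1] IndexError); the .getD 0 on
-- index? is unreachable (the filter guarantees membership, as in the Python comprehension).
def pvACheck (current_series : List (List String)) (s : String) : Option Bool :=
  let index_list : List (Int × Int) :=
    ((PySem.List.enumerate current_series 0).filter (fun p => decide (s ∈ p.2))).map
      (fun p => (p.1, (((PySem.List.index? p.2 s).getD 0 : Nat) : Int)))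
  match PySem.List.pyGet? index_list 0 with
  | none => none
  | some pr =>
    match PySem.List.pyGet? current_series pr.1 with
    | none => none
    | some row =>
      match PySem.List.pyGet? row 1 with
      | none => none
      | some col => some (col == "black")

def find_blank_series (series : List String) (current_series : List (List String)) : List String :=
  (PySem.List.pyRange 0 (PySem.List.len series) 1).foldl
    (fun blank k =>
      match pvACheck current_series (PySem.List.pyGetD series k "") with
      | some true => blank ++ [PySem.List.pyGetD series k ""]
      | _ => blank) []

-- ===== PORT B =====
-- for row in current_series:
--   if len(row) > 1:
--     b = (row[1] == "black"); for el in row: is_black.setdefault(el, b)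
-- len(row) > 1 guards row[1], so pyGetD is exact there.
def pvIsBlack (current_series : List (List String)) : PySem.Dict String Bool :=
  current_series.foldl
    (fun d row =>
      if 1 < PySem.List.len row then
        let b := (PySem.List.pyGetD row 1 "" == "black")
        row.foldl (fun d el => d.setdefault el b) d
      else d)
    PySem.Dict.empty

-- [s for s in series if is_black[s]]; the 'none' branch is where the Python
-- raises KeyError, outside Pre_.
def find_blank_series_alt (series : List String) (current_series : List (List String)) : List String :=
  let is_black := pvIsBlack current_series
  series.filter (fun s =>
    match is_black.get? s with
    | none => false
    | some b => b)

-- ===== PRECONDITION & SPEC =====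
-- Pre_ excludes exactly the inputs where the Python A raises: a series element contained in
-- no row of current_series (index[0] IndexError), or whose first containing row has fewer
-- than 2 entries (current_series[index][1] IndexError).
def Pre_find_blank_series (series : List String) (current_series : List (List String)) : Prop :=
  ∀ s ∈ series, 2 ≤ ((current_series.find? (fun r => decide (s ∈ r))).map List.length).getD 0
instance (series : List String) (current_series : List (List String)) : Decidable (Pre_find_blank_series series current_series) := by unfold Pre_find_blank_series; infer_instance

def pvWitness_find_blank_series : List String × List (List String) :=
  (["a", "c"], [["b", "white"], ["a", "black"], ["c", "white", "x"]])

def Spec_find_blank_series (series : List String) (current_series : List (List String)) (out : List String) : Prop := out = find_blank_series_alt series current_series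
instance (series : List String) (current_series : List (List String)) (out : List String) : Decidable (Spec_find_blank_series series current_series out) := by unfold Spec_find_blank_series; infer_instance

-- ===== CLAIM (what is proved, stated in full; the proofs are below) =====
def Claim_equal_find_blank_series : Prop := ∀ (series : List String) (current_series : List (List String)), Dom_find_blank_series series current_series → Pre_find_blank_series series current_series → Spec_find_blank_series series current_series (find_blank_series series current_series)

-- ===== LEMMAS AND PROOFS =====

-- the first match of find? sits at findIdx
theorem pv_find?_getElem {α : Type} (p : α → Bool) :
    ∀ (l : List α) (r : α), l.find? p = some r → l[l.findIdx p]? = some r := by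
  intro l
  induction l with
  | nil => intro r h; simp at h
  | cons x xs ih =>
    intro r h
    by_cases hx : p x = true
    · simp [hx, List.findIdx_cons] at h ⊢; exact h
    · simp only [List.find?_cons, hx, List.findIdx_cons, cond_false] at h ⊢
      simpa using ih r h

-- head of the filtered enumerate = first containing row, at index findIdx
theorem pv_enumHead (s : String) :
    ∀ (cs : List (List String)) (n : Nat),
      ((PySem.List.enumerate cs (n : Int)).filter (fun p => decide (s ∈ p.2))).head? =
        (cs.find? (fun r => decide (s ∈ r))).map
          (fun r => (((n + cs.findIdx (fun r => decide (s ∈ r)) : Nat) : Int), r)) := by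
  intro cs
  induction cs with
  | nil => intro n; simp [PySem.List.enumerate_nil]
  | cons r cs ih =>
    intro n
    rw [PySem.List.enumerate_cons]
    by_cases hr : s ∈ r
    · simp [hr, List.findIdx_cons]
    · have : ((n : Int) + 1) = ((n + 1 : Nat) : Int) := by push_cast; ring
      simp only [List.filter_cons, hr, decide_false, Bool.false_eq_true, if_false, this]
      rw [ih (n + 1)]
      simp [hr, List.findIdx_cons]
      cases h : cs.find? (fun r => decide (s ∈ r)) with
      | none => rfl
      | some r' => simp; ring

-- A's per-element check, characterised by find?
theorem pv_aCheck_eq (cs : List (List String)) (s : String) :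
    pvACheck cs s =
      match cs.find? (fun r => decide (s ∈ r)) with
      | none => none
      | some r =>
        match PySem.List.pyGet? r 1 with
        | none => none
        | some col => some (col == "black") := by
  unfold pvACheck
  simp only [PySem.List.pyGet?_zero, ← List.head?_eq_getElem?, List.head?_map]
  rw [show (PySem.List.enumerate cs 0) = PySem.List.enumerate cs ((0 : Nat) : Int) from rfl,
    pv_enumHead s cs 0]
  cases h : cs.find? (fun r => decide (s ∈ r)) with
  | none => simp
  | some r =>
    have hidx := pv_find?_getElem _ cs r h
    simp only [Option.map_some, Nat.zero_add]
    rw [PySem.List.pyGet?_natCast]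
    simp [hidx]

-- B's row test equals (pyGet? row 1 == some "black")
theorem pv_rowTest_eq (row : List String) :
    (decide (1 < PySem.List.len row) && (PySem.List.pyGetD row 1 "" == "black")) =
      (PySem.List.pyGet? row 1 == some "black") := by
  cases h : PySem.List.pyGet? row (1 : Int) with
  | none =>
    have hlen : row.length ≤ 1 := by
      have := (PySem.List.pyGet?_eq_none_iff (xs := row) (i := 1)).mp h
      simp [PySem.Raise.InRange] at this
      omega
    simp
    intro hgt
    exact absurd hgt (by omega)
  | some col =>
    have hlen : 1 < row.length := by
      by_contra hc
      have : PySem.List.pyGet? row (1 : Int) = none := by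
        rw [PySem.List.pyGet?_eq_none_iff]
        simp [PySem.Raise.InRange]; omega
      simp [this] at h
    have hlenI : (1 : Int) < PySem.List.len row := by simp [PySem.List.len_eq]; omega
    have hg : PySem.List.pyGet? row (1 : Int) = some row[(1 : Int).toNat] := by
      apply PySem.List.pyGet?_eq_some_getElem <;> omega
    have hgd : PySem.List.pyGetD row (1 : Int) "" = row[(1 : Int).toNat] := by
      apply PySem.List.pyGetD_eq_getElem <;> omega
    rw [hg] at h
    rw [hgd, Option.some.inj h]
    simp
    exact fun _ => hlen

-- B's inner row fold, characterised by membership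
theorem pv_inner_get (s : String) (b : Bool) :
    ∀ (row : List String) (d : PySem.Dict String Bool),
      ((row.foldl (fun d el => d.setdefault el b) d).get? s) =
        ((d.get? s).or (if s ∈ row then some b else none)) := by
  intro row
  induction row with
  | nil => intro d; simp
  | cons el rest ih =>
    intro d
    simp only [List.foldl_cons]
    rw [ih]
    by_cases he : s = el
    · subst he
      rw [PySem.Dict.get?_setdefault_self]
      cases h : d.get? s <;> simp [Option.or, List.mem_cons]
    · rw [PySem.Dict.get?_setdefault_of_ne _ _ he]
      simp [List.mem_cons, he]

-- B's sweep: lookup = boolean of the first colored row containing s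
theorem pv_isBlack_get (s : String) :
    ∀ (cs : List (List String)) (d : PySem.Dict String Bool),
      ((cs.foldl
        (fun d row =>
          if 1 < PySem.List.len row then
            let b := (PySem.List.pyGetD row 1 "" == "black")
            row.foldl (fun d el => d.setdefault el b) d
          else d) d).get? s) =
        ((d.get? s).or
          ((cs.find? (fun r => decide (1 < PySem.List.len r) && decide (s ∈ r))).map
            (fun r => PySem.List.pyGetD r 1 "" == "black"))) := by
  intro cs
  induction cs with
  | nil => intro d; simp
  | cons row cs ih =>
    intro d
    simp only [List.foldl_cons, List.find?_cons]
    by_cases hl : (1 : Int) < PySem.List.len row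
    · simp only [hl, if_true, decide_true, Bool.true_and]
      rw [ih, pv_inner_get]
      by_cases hr : s ∈ row
      · simp [hr]
      · simp [hr]
    · simp only [hl, if_false, decide_false, Bool.false_and]
      rw [ih]

-- under Pre_, the first containing row is itself the first colored containing row
theorem pv_find_long (s : String) (r : List String) :
    ∀ (cs : List (List String)),
      cs.find? (fun t => decide (s ∈ t)) = some r → 1 < r.length →
      cs.find? (fun t => decide (1 < PySem.List.len t) && decide (s ∈ t)) = some r := by
  intro cs
  induction cs with
  | nil => intro h; simp at h
  | cons row cs ih =>
    intro h hl
    by_cases hr : s ∈ row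
    · simp only [List.find?_cons, hr, decide_true, Option.some.injEq] at h
      subst h
      have : (1 : Int) < PySem.List.len row := by simp [PySem.List.len_eq]; omega
      simp [hr, hl]
    · simp only [List.find?_cons, hr, decide_false] at h
      simp only [List.find?_cons, hr, decide_false, Bool.and_false]
      exact ih h hl

-- ===== VERDICT (by name: the statement is the Claim_ definition above) =====
theorem find_blank_series_spec : Claim_equal_find_blank_series := by
  intro series cs _ hpre
  unfold Spec_find_blank_series find_blank_series find_blank_series_alt
  rw [PySem.List.foldl_pyRange_pyGetD series ""
      (fun blank s =>
        match pvACheck cs s with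
        | some true => blank ++ [s]
        | _ => blank) [] (by norm_num)]
  simp only [Int.toNat_zero, List.drop_zero]
  calc series.foldl (fun blank s =>
          match pvACheck cs s with
          | some true => blank ++ [s]
          | _ => blank) []
      = series.foldl (fun blank s =>
          if (pvACheck cs s == some true) then blank ++ [s] else blank) [] := by
        apply PySem.List.foldl_congr_mem
        intro acc x _
        cases h : pvACheck cs x with
        | none => simp
        | some b => cases b <;> simp
    _ = [] ++ series.filter (fun s => pvACheck cs s == some true) :=
        PySem.List.foldl_append_if_eq_filter _ series []
    _ = series.filter (fun s =>
          match (pvIsBlack cs).get? s with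
          | none => false
          | some b => b) := by
        simp only [List.nil_append]
        apply List.filter_congr
        intro x hx
        have hx2 := hpre x hx
        rw [pv_aCheck_eq]
        cases hfind : cs.find? (fun r => decide (x ∈ r)) with
        | none => simp [hfind] at hx2
        | some r =>
          have hrlen : 2 ≤ r.length := by simpa [hfind] using hx2
          cases h1 : PySem.List.pyGet? r (1 : Int) with
          | none =>
            have := (PySem.List.pyGet?_eq_none_iff (xs := r) (i := 1)).mp h1
            simp [PySem.Raise.InRange] at this
            omega
          | some col =>
            have hlong := pv_find_long x r cs hfind (by omega)
            have hval : (PySem.List.pyGetD r 1 "" == "black") = (col == "black") := by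
              have hlenI : (1 : Int) < PySem.List.len r := by
                simp [PySem.List.len_eq]; omega
              have hrt := pv_rowTest_eq r
              rw [h1, decide_eq_true hlenI, Bool.true_and] at hrt
              simpa using hrt
            have hget : (pvIsBlack cs).get? x = some (col == "black") := by
              unfold pvIsBlack
              rw [pv_isBlack_get x cs PySem.Dict.empty, hlong]
              simp [hval]
            simp only [h1, hget]
            cases hb : (col == "black") <;> simp
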